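-- pv_equiv track=rewrite | github.com/jordanaron22/Weighted-Voting-Comps-Winter-Spring-2018 | CowFinder.py | create_perms
-- ===== SOURCE A (Python) =====
-- import itertools
--
-- def create_perms(size):
--     lst = list(itertools.product([0, 1], repeat=size))
--     set_of_coalitions = []
--
--     for item in lst:
--         coalition = ""
--
--         for index in range(size):
--             value = item[index] * (65 + index)
--             if item[index] != 0:
--                 coalition = coalition + chr(value)
--         set_of_coalitions.append(coalition)
--
--     set_of_coalitions.sort(key=len)
--     set_of_coalitions.reverse()
--     set_of_coalitions.pop()
--
--     return set_of_coalitions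
-- ===== SOURCE B (Python) =====
-- import itertools
--
-- def create_perms(size):
--     # Bucket by coalition length instead of sort/reverse/pop:
--     # emit buckets from longest down to length 1 (the empty coalition is never emitted),
--     # each bucket reversed to match descending order with last-generated-first ties.
--     buckets = [[] for _ in range(size + 1)]
--     for bits in itertools.product([0, 1], repeat=size):
--         s = "".join(chr(65 + j) for j, b in enumerate(bits) if b)
--         buckets[len(s)].append(s)
--     result = []
--     for length in range(size, 0, -1):
--         result.extend(reversed(buckets[length]))
--     return result
-- ===== Notes on version B (the rewrite author's own statement) =====
-- stated objective: alternative
-- what changed: Replaces the sort-by-length / reverse / pop pipeline with a length-indexed bucket (counting-sort) pass: each coalition string is appended to its length bucket and the result is emitted bucket by bucket from the longest length down to 1, each bucket back-to-front, never emitting the empty coalition.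
import Mathlib
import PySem

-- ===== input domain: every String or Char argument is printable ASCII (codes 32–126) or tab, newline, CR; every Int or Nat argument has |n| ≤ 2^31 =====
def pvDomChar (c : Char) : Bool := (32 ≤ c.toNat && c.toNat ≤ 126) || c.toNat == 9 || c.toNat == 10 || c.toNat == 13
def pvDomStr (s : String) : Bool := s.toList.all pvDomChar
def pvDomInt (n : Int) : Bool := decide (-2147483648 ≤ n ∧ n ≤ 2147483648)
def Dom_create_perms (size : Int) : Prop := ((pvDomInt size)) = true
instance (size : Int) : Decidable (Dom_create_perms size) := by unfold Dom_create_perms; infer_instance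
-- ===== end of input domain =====

-- B replaces A's sort-by-length/reverse/pop with a counting sort into length buckets, emitted longest-first.
-- Strings are built as List Char and converted with String.ofList only at the end (Lean's own String ops are
-- kernel-opaque); exact, since every character is the plain ASCII letter chr(65+j).

-- ===== PORT A =====
-- itertools.product([0,1], repeat=n) in CPython's order (first coordinate varies slowest); shared library helper.
def pvProd : Nat → List (List Int)
  | 0 => [[]]
  | n + 1 => ([0, 1] : List Int).flatMap (fun x => (pvProd n).map (fun t => x :: t))

def create_perms (size : Int) : List String :=
  let lst := pvProd size.toNat
  let set_of_coalitions := lst.foldl (fun acc item =>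
    let coalition := (PySem.List.pyRange 0 size 1).foldl (fun c index =>
      let value := (PySem.List.pyGetD item index 0) * (65 + index)
      if PySem.List.pyGetD item index 0 ≠ 0 then c ++ [Char.ofNat value.toNat] else c) ([] : List Char)
    acc ++ [coalition]) ([] : List (List Char))
  let s := PySem.List.sorted set_of_coalitions (fun c => c.length)
  let r := s.reverse
  match PySem.List.pop? r with
  | some (_, rest) => rest.map String.ofList
  | none => []        -- unreachable under Pre_ (the list always holds at least the empty coalition)

-- ===== PORT B =====
-- s = "".join(chr(65 + j) for j, b in enumerate(bits) if b)
def pvCoal (item : List Int) : List Char :=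
  ((PySem.List.enumerate item).filter (fun p => decide (p.2 ≠ 0))).map
    (fun p => Char.ofNat (65 + p.1).toNat)

def create_perms_alt (size : Int) : List String :=
  let n := size.toNat
  let buckets := (List.range (n + 1)).map (fun _ => ([] : List (List Char)))
  let buckets := (pvProd n).foldl (fun bs item =>
    let s := pvCoal item
    bs.set s.length (bs.getD s.length [] ++ [s])) buckets
  let result := (PySem.List.pyRange size 0 (-1)).foldl
    (fun acc length => acc ++ (buckets.getD length.toNat []).reverse) ([] : List (List Char))
  result.map String.ofList

-- ===== PRECONDITION & SPEC =====
-- A raises ValueError (itertools.product with negative repeat) for size < 0; excluded (B raises there too).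
def Pre_create_perms (size : Int) : Prop := 0 ≤ size
instance (size : Int) : Decidable (Pre_create_perms size) := by unfold Pre_create_perms; infer_instance
def pvWitness_create_perms : Int := (2)

def Spec_create_perms (size : Int) (out : List String) : Prop := out = create_perms_alt size
instance (size : Int) (out : List String) : Decidable (Spec_create_perms size out) := by unfold Spec_create_perms; infer_instance

-- ===== CLAIM (what is proved, stated in full; the proofs are below) =====
def Claim_equal_create_perms : Prop := ∀ (size : Int), Dom_create_perms size → Pre_create_perms size → Spec_create_perms size (create_perms size)

-- ===== LEMMAS AND PROOFS =====

-- every item of pvProd n has length n and entries 0 or 1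
theorem pvProd_shape (n : Nat) : ∀ item ∈ pvProd n, item.length = n ∧ ∀ v ∈ item, v = 0 ∨ v = 1 := by
  induction n with
  | zero => intro item h; simp [pvProd] at h; simp [h]
  | succ n ih =>
    intro item h
    simp only [pvProd, List.mem_flatMap, List.mem_map] at h
    obtain ⟨x, hx, t, ht, rfl⟩ := h
    obtain ⟨hl, hv⟩ := ih t ht
    refine ⟨by simp [hl], ?_⟩
    intro v hv'
    rcases List.mem_cons.mp hv' with rfl | hvt
    · simp at hx; rcases hx with rfl | rfl <;> simp
    · exact hv v hvt

theorem pvCoal_len_le (item : List Int) : (pvCoal item).length ≤ item.length := by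
  have := List.length_filter_le (fun p => decide (p.2 ≠ 0)) (PySem.List.enumerate item)
  simpa [pvCoal, PySem.List.length_enumerate] using this

theorem pvCoal_eq_nil_iff (item : List Int) : pvCoal item = [] ↔ ∀ v ∈ item, v = 0 := by
  rw [pvCoal, List.map_eq_nil_iff, List.filter_eq_nil_iff]
  constructor
  · intro h v hv
    rw [← PySem.List.map_snd_enumerate item 0] at hv
    obtain ⟨p, hp, rfl⟩ := List.mem_map.mp hv
    have := h p hp
    simpa using this
  · intro h p hp
    have : p.2 ∈ item := by
      rw [← PySem.List.map_snd_enumerate item 0]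
      exact List.mem_map.mpr ⟨p, hp, rfl⟩
    simpa using h p.2 this

-- A's inner loop computes pvCoal
theorem coalA_eq (size : Int) (item : List Int)
    (hlen : (item.length : Int) = size)
    (hv : ∀ v ∈ item, v = 0 ∨ v = 1) :
    (PySem.List.pyRange 0 size 1).foldl (fun c index =>
      if PySem.List.pyGetD item index 0 ≠ 0 then
        c ++ [Char.ofNat ((PySem.List.pyGetD item index 0) * (65 + index)).toNat] else c)
      ([] : List Char) = pvCoal item := by
  subst hlen
  rw [PySem.List.foldl_append_ite (p := fun index => PySem.List.pyGetD item index 0 ≠ 0)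
      (f := fun index => Char.ofNat ((PySem.List.pyGetD item index 0) * (65 + index)).toNat)]
  rw [pvCoal, PySem.List.enumerate_eq_map_pyRange item 0, List.filter_map, List.map_map]
  simp only [PySem.List.len_eq, List.nil_append]
  apply List.map_congr_left
  intro j hj
  obtain ⟨hj1, hj2⟩ := List.mem_filter.mp hj
  have hjr := PySem.List.mem_pyRange_one.mp hj1
  have hget : PySem.List.pyGetD item j 0 = item[j.toNat] :=
    PySem.List.pyGetD_eq_getElem item 0 hjr.1 hjr.2
  have hne : PySem.List.pyGetD item j 0 ≠ 0 := by simpa using hj2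
  have hmem : item[j.toNat] ∈ item := List.getElem_mem _
  rcases hv _ hmem with h0 | h1
  · rw [hget] at hne; exact absurd h0 hne
  · rw [hget, h1, one_mul]; rfl

-- step function of B's bucket fold
def pvStep (bs : List (List (List Char))) (item : List Int) : List (List (List Char)) :=
  bs.set (pvCoal item).length (bs.getD (pvCoal item).length [] ++ [pvCoal item])

theorem length_foldl_pvStep (items : List (List Int)) (init : List (List (List Char))) :
    (items.foldl pvStep init).length = init.length := by
  induction items generalizing init with
  | nil => rfl
  | cons x items ih => simp [List.foldl_cons, ih, pvStep]

-- buckets after B's fold: bucket L holds exactly the coalitions of length L, in generation order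
theorem buckets_getD (n : Nat) (items : List (List Int))
    (hle : ∀ item ∈ items, (pvCoal item).length ≤ n) (L : Nat) :
    (items.foldl pvStep ((List.range (n + 1)).map (fun _ => ([] : List (List Char))))).getD L []
      = (items.map pvCoal).filter (fun s => s.length == L) := by
  simp only [List.map_const', List.length_range]
  induction items using List.reverseRecOn with
  | nil =>
    simp only [List.foldl_nil, List.map_nil, List.filter_nil, List.getD, List.getElem?_replicate]
    split <;> simp
  | append_singleton items x ih =>
    have hle' : ∀ item ∈ items, (pvCoal item).length ≤ n := fun i h => hle i (by simp [h])
    have hk : (pvCoal x).length ≤ n := hle x (by simp)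
    have hlenB : (items.foldl pvStep (List.replicate (n + 1) ([] : List (List Char)))).length = n + 1 := by
      rw [length_foldl_pvStep]; simp
    rw [List.foldl_append, List.foldl_cons, List.foldl_nil]
    rw [List.map_append, List.filter_append]
    by_cases hL : L = (pvCoal x).length
    · subst hL
      rw [pvStep, List.getD, List.getElem?_set_self (by omega)]
      have ih' := ih hle'
      rw [List.getD] at ih'
      simp [ih']
    · rw [pvStep, List.getD, List.getElem?_set_ne (by omega)]
      have : (List.filter (fun s => s.length == L) (List.map pvCoal [x])) = [] := by
        simp [Ne.symm hL]
      rw [this, List.append_nil, ← ih hle', List.getD]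

-- insertBy skips a prefix it is not inserted into
theorem insertBy_append_of_not_before {α : Type} (before : α → α → Bool) (x : α)
    (A B : List α) (hA : ∀ a ∈ A, before x a = false) :
    PySem.List.insertBy before x (A ++ B) = A ++ PySem.List.insertBy before x B := by
  induction A with
  | nil => simp
  | cons a A ih =>
    have ha := hA a (by simp)
    have ih' := ih (fun a h => hA a (by simp [h]))
    simp [PySem.List.insertBy, ha, ih']

theorem insertBy_cons_of_all_before {α : Type} (before : α → α → Bool) (x : α)
    (S : List α) (hS : ∀ y ∈ S, before x y = true) :
    PySem.List.insertBy before x S = x :: S := by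
  cases S with
  | nil => simp [PySem.List.insertBy]
  | cons s S => simp [PySem.List.insertBy, hS s (by simp)]

theorem flatMap_congr_mem {α β : Type} {l : List α} {f g : α → List β}
    (h : ∀ a ∈ l, f a = g a) : l.flatMap f = l.flatMap g := by
  induction l with
  | nil => rfl
  | cons a l ih => simp [List.flatMap_cons, h a (by simp), ih (fun a ha => h a (by simp [ha]))]

-- stable sort by length = concatenation of the length buckets in increasing length order
theorem sorted_len_eq_buckets (n : Nat) (xs : List (List Char))
    (hle : ∀ s ∈ xs, s.length ≤ n) :
    PySem.List.sorted xs (fun c => c.length)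
      = (List.range (n + 1)).flatMap (fun L => xs.filter (fun s => s.length == L)) := by
  rw [PySem.List.sorted_eq_foldl_insertBy]
  induction xs using List.reverseRecOn with
  | nil => simp
  | append_singleton xs x ih =>
    have hxs : ∀ s ∈ xs, s.length ≤ n := fun s h => hle s (by simp [h])
    have hk : x.length ≤ n := hle x (by simp)
    rw [List.foldl_append, List.foldl_cons, List.foldl_nil, ih hxs]
    have hsplit : List.range (n + 1) = List.range (x.length + 1)
        ++ (List.range (n - x.length)).map (fun i => (x.length + 1) + i) := by
      rw [← List.range_add]; congr 1; omega
    rw [hsplit, List.flatMap_append, List.flatMap_append]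
    rw [insertBy_append_of_not_before _ _ _ _ (by
      intro a ha
      simp only [List.mem_flatMap, List.mem_range, List.mem_filter] at ha
      obtain ⟨L, hL, _, hlen⟩ := ha
      have : a.length = L := by simpa using hlen
      simp; omega)]
    rw [insertBy_cons_of_all_before _ _ _ (by
      intro y hy
      simp only [List.mem_flatMap, List.mem_map, List.mem_range, List.mem_filter] at hy
      obtain ⟨L, ⟨i, hi, rfl⟩, _, hlen⟩ := hy
      have : y.length = x.length + 1 + i := by simpa using hlen
      simp; omega)]
    -- now rearrange the RHS buckets of xs ++ [x]
    have h1 : (List.range (x.length + 1)).flatMap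
        (fun L => (xs ++ [x]).filter (fun s => s.length == L))
        = (List.range (x.length + 1)).flatMap (fun L => xs.filter (fun s => s.length == L)) ++ [x] := by
      rw [List.range_succ, List.flatMap_append, List.flatMap_append]
      have hfr : (List.range x.length).flatMap (fun L => (xs ++ [x]).filter (fun s => s.length == L))
          = (List.range x.length).flatMap (fun L => xs.filter (fun s => s.length == L)) := by
        apply flatMap_congr_mem
        intro L hL
        rw [List.filter_append]
        have : List.filter (fun s => s.length == L) [x] = [] := by
          simp at hL ⊢; omega
        simp [this]
      rw [hfr]
      simp [List.filter_append]
    have h2 : ((List.range (n - x.length)).map (fun i => (x.length + 1) + i)).flatMap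
        (fun L => (xs ++ [x]).filter (fun s => s.length == L))
        = ((List.range (n - x.length)).map (fun i => (x.length + 1) + i)).flatMap
          (fun L => xs.filter (fun s => s.length == L)) := by
      apply flatMap_congr_mem
      intro L hL
      rw [List.filter_append]
      have : List.filter (fun s => s.length == L) [x] = [] := by
        simp only [List.mem_map, List.mem_range] at hL
        obtain ⟨i, hi, rfl⟩ := hL
        simp; omega
      simp [this]
    rw [h1, h2]
    simp

-- the all-zero tuple is the unique one whose coalition is empty
theorem pvProd_filter_zero (n : Nat) :
    (pvProd n).filter (fun item => item.all (fun v => v == 0)) = [List.replicate n 0] := by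
  induction n with
  | zero => simp [pvProd]
  | succ n ih =>
    simp only [pvProd, List.filter_flatMap]
    have h0 : ((fun (item : List Int) => item.all fun v => v == 0) ∘ fun t => (0 : Int) :: t)
        = fun t => t.all fun v => v == 0 := by funext t; simp
    have h1 : ((fun (item : List Int) => item.all fun v => v == 0) ∘ fun t => (1 : Int) :: t)
        = fun _ => false := by funext t; simp
    simp [List.filter_map, h0, h1, ih, List.replicate_succ]

-- descending index list [n, n-1, …, 1] in two guises
theorem idx_list (n : Nat) :
    ((List.range n).map Nat.succ).reverse = (List.range n).map (fun k => n - k) := by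
  apply List.ext_getElem
  · simp
  · intro i h1 h2
    simp only [List.getElem_reverse, List.length_map, List.length_range, List.getElem_map,
      List.getElem_range]
    simp at h2
    omega

-- ===== VERDICT (by name: the statement is the Claim_ definition above) =====
theorem create_perms_spec : Claim_equal_create_perms := by
  intro size _ hpre
  unfold Spec_create_perms
  obtain ⟨n, rfl⟩ : ∃ n : Nat, size = (n : Int) := ⟨size.toNat, (Int.toNat_of_nonneg hpre).symm⟩
  have hbound : ∀ s ∈ (pvProd n).map pvCoal, s.length ≤ n := by
    intro s hs
    obtain ⟨item, hitem, rfl⟩ := List.mem_map.mp hs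
    have := (pvProd_shape n item hitem).1
    calc (pvCoal item).length ≤ item.length := pvCoal_len_le item
      _ = n := this
  -- A side
  have hA : create_perms (n : Int) = (((List.range n).map Nat.succ).reverse.flatMap
      (fun L => (((pvProd n).map pvCoal).filter (fun s => s.length == L)).reverse)).map String.ofList := by
    rw [create_perms]
    simp only [Int.toNat_natCast]
    rw [PySem.List.foldl_append_singleton_eq_map]
    rw [List.map_congr_left (fun item hitem => coalA_eq (n : Int) item
      (by exact_mod_cast congrArg Nat.cast (pvProd_shape n item hitem).1) (pvProd_shape n item hitem).2)]
    rw [List.nil_append, sorted_len_eq_buckets n _ hbound]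
    rw [List.reverse_flatMap]
    have h0 : (List.range (n + 1)).reverse = ((List.range n).map Nat.succ).reverse ++ [0] := by
      rw [List.range_succ_eq_map]; simp
    rw [h0, List.flatMap_append]
    have hz : ((pvProd n).map pvCoal).filter (fun s => s.length == 0) = [[]] := by
      rw [List.filter_map]
      rw [List.filter_congr (q := fun item => item.all (fun v => v == 0)) (by
        intro item hitem
        show ((pvCoal item).length == 0) = item.all (fun v => v == 0)
        rw [Bool.eq_iff_iff]
        simp only [beq_iff_eq, List.length_eq_zero_iff, pvCoal_eq_nil_iff, List.all_eq_true,
          beq_iff_eq])]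
      rw [pvProd_filter_zero]
      simp [pvCoal_eq_nil_iff]
    have hlast : List.flatMap (List.reverse ∘ fun L =>
        List.filter (fun s => s.length == L) (List.map pvCoal (pvProd n))) [0] = [[]] := by
      simp [hz]
    rw [hlast, PySem.List.pop?_last]
    rfl
  -- B side
  have hB : create_perms_alt (n : Int) = (((List.range n).map (fun k => n - k)).flatMap
      (fun L => (((pvProd n).map pvCoal).filter (fun s => s.length == L)).reverse)).map String.ofList := by
    rw [create_perms_alt]
    simp only [Int.toNat_natCast]
    rw [show (fun (bs : List (List (List Char))) (item : List Int) =>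
          bs.set (pvCoal item).length (bs.getD (pvCoal item).length [] ++ [pvCoal item])) = pvStep
        from rfl]
    rw [PySem.List.foldl_append_eq_flatMap]
    rw [List.nil_append]
    rw [flatMap_congr_mem (g := fun L => ((((pvProd n).map pvCoal).filter
        (fun s => s.length == L.toNat)).reverse)) (by
      intro L hL
      rw [buckets_getD n (pvProd n) (fun item h => by
        have := (pvProd_shape n item h).1
        calc (pvCoal item).length ≤ item.length := pvCoal_len_le item
          _ = n := this)])]
    rw [PySem.List.pyRange_neg_one]
    simp only [sub_zero, Int.toNat_natCast]
    rw [List.flatMap_map]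
    rw [flatMap_congr_mem (g := fun k => (((pvProd n).map pvCoal).filter
        (fun s => s.length == n - k)).reverse) (by
      intro k hk
      simp only [List.mem_range] at hk
      have : ((n : Int) - (k : Int)).toNat = n - k := by omega
      rw [this])]
    rw [List.flatMap_map]
  rw [hA, hB, idx_list n, List.flatMap_map]
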